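-- pv_equiv track=rewrite | github.com/spudgun00/podinsight-narrative | demo/extract_css_advanced.py | parse_css_rules
-- ===== SOURCE A (Python) =====
-- def parse_css_rules(css_content):
--     """Parse CSS into individual rules with proper nesting handling"""
--     rules = []
--     current_rule = []
--     brace_depth = 0
--     in_comment = False
--
--     lines = css_content.split('\n')
--
--     i = 0
--     while i < len(lines):
--         line = lines[i]
--
--         # Handle multi-line comments
--         if '/*' in line and '*/' not in line:
--             in_comment = True
--             comment_lines = [line]
--             i += 1
--             while i < len(lines) and '*/' not in lines[i]:
--                 comment_lines.append(lines[i])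
--                 i += 1
--             if i < len(lines):
--                 comment_lines.append(lines[i])
--             comment_text = '\n'.join(comment_lines)
--             rules.append({'type': 'comment', 'content': comment_text})
--             in_comment = False
--             i += 1
--             continue
--
--         # Single line comment
--         if line.strip().startswith('/*') and line.strip().endswith('*/'):
--             rules.append({'type': 'comment', 'content': line})
--             i += 1
--             continue
--
--         # Track brace depth
--         open_braces = line.count('{')
--         close_braces = line.count('}')
--
--         if open_braces > 0 and brace_depth == 0:
--             # Start of a new rule
--             current_rule = [line]
--             brace_depth += open_braces - close_braces
--         elif brace_depth > 0:
--             # Inside a rule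
--             current_rule.append(line)
--             brace_depth += open_braces - close_braces
--
--             if brace_depth == 0:
--                 # Rule complete
--                 rule_content = '\n'.join(current_rule)
--                 rules.append({'type': 'rule', 'content': rule_content})
--                 current_rule = []
--         elif line.strip():
--             # Standalone line (shouldn't happen in well-formed CSS)
--             rules.append({'type': 'other', 'content': line})
--
--         i += 1
--
--     return rules
-- ===== SOURCE B (Python) =====
-- def parse_css_rules(css_content):
--     """Parse CSS into rule/comment/other segments: single forward pass, persistent state, no index arithmetic."""
--     rules = []
--     in_comment = False
--     comment_buffer = []
--     brace_depth = 0
--     current_rule = []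
--
--     for line in css_content.split('\n'):
--         if in_comment:
--             comment_buffer.append(line)
--             if '*/' in line:
--                 rules.append({'type': 'comment', 'content': '\n'.join(comment_buffer)})
--                 comment_buffer = []
--                 in_comment = False
--         elif '/*' in line and '*/' not in line:
--             in_comment = True
--             comment_buffer = [line]
--         elif line.strip().startswith('/*') and line.strip().endswith('*/'):
--             rules.append({'type': 'comment', 'content': line})
--         else:
--             open_braces = line.count('{')
--             close_braces = line.count('}')
--             if open_braces > 0 and brace_depth == 0:
--                 current_rule = [line]
--                 brace_depth += open_braces - close_braces
--             elif brace_depth > 0: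
--                 current_rule.append(line)
--                 brace_depth += open_braces - close_braces
--                 if brace_depth == 0:
--                     rules.append({'type': 'rule', 'content': '\n'.join(current_rule)})
--                     current_rule = []
--             elif line.strip():
--                 rules.append({'type': 'other', 'content': line})
--
--     if in_comment:
--         # EOF inside an unterminated comment: emit it (as A does); an unfinished rule is dropped.
--         rules.append({'type': 'comment', 'content': '\n'.join(comment_buffer)})
--     return rules
-- ===== Notes on version B (the rewrite author's own statement) =====
-- stated objective: simpler
-- what changed: Replaces A's index-based while loop with a nested inner while for multi-line comments by a single flat for-loop over the lines that carries persistent state (in_comment flag and comment buffer), eliminating all index arithmetic.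
import Mathlib
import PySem

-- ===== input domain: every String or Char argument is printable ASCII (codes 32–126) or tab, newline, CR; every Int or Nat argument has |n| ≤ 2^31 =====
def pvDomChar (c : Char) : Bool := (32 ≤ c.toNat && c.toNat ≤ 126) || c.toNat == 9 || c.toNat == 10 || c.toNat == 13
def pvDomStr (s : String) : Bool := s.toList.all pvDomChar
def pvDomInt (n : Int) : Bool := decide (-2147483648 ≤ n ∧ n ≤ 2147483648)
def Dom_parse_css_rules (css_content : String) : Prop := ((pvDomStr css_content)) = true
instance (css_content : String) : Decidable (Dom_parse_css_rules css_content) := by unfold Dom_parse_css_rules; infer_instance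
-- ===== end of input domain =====

-- B replaces A's index-based while-loop with an inner comment-consuming while by a single
-- forward pass over the lines carrying persistent state (objective: simpler decomposition).

-- ===== PORT A =====
-- the dict {'type': t, 'content': c}
def pvEntry (t c : String) : List (String × String) := [("type", t), ("content", c)]

-- A's inner while loop: consume lines up to and including the first one containing '*/'
def pvConsumeA : List String → List String × List String
  | [] => ([], [])
  | l :: ls =>
    if PySem.Str.isIn "*/" l then ([l], ls)
    else
      let p := pvConsumeA ls
      (l :: p.1, p.2)

theorem pvConsumeA_len (ls : List String) : (pvConsumeA ls).2.length ≤ ls.length := by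
  induction ls with
  | nil => simp [pvConsumeA]
  | cons l ls ih =>
    simp only [pvConsumeA]
    split
    · simp
    · simpa using Nat.le_succ_of_le ih

-- A's outer while loop (i only advances; the in_comment flag of A is never read, hence omitted)
def pvGoA (rules : List (List (String × String))) (cur : List String) (depth : Int) :
    List String → List (List (String × String))
  | [] => rules
  | line :: rest =>
    if PySem.Str.isIn "/*" line && !PySem.Str.isIn "*/" line then
      let p := pvConsumeA rest
      pvGoA (rules ++ [pvEntry "comment" (PySem.Str.join "\n" (line :: p.1))]) cur depth p.2
    else if PySem.Str.startswith (PySem.Str.strip line) "/*" &&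
            PySem.Str.endswith (PySem.Str.strip line) "*/" then
      pvGoA (rules ++ [pvEntry "comment" line]) cur depth rest
    else
      let ob : Int := PySem.Str.count line "{"
      let cb : Int := PySem.Str.count line "}"
      if ob > 0 && depth == 0 then
        pvGoA rules [line] (depth + (ob - cb)) rest
      else if depth > 0 then
        let cur' := cur ++ [line]
        let depth' := depth + (ob - cb)
        if depth' == 0 then
          pvGoA (rules ++ [pvEntry "rule" (PySem.Str.join "\n" cur')]) [] depth' rest
        else
          pvGoA rules cur' depth' rest
      else if PySem.Str.strip line ≠ "" then
        pvGoA (rules ++ [pvEntry "other" line]) cur depth rest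
      else
        pvGoA rules cur depth rest
termination_by ls => ls.length
decreasing_by
  · exact Nat.lt_succ_of_le (pvConsumeA_len rest)
  all_goals exact Nat.lt_succ_self _

def parse_css_rules (css_content : String) : List (List (String × String)) :=
  pvGoA [] [] 0 ((PySem.Str.split? css_content "\n").getD [])  -- sep "\n" ≠ "", so split? is always some

-- ===== PORT B =====
-- B's single for-loop over the lines, with persistent state (in_comment, comment_buffer, brace_depth, current_rule)
def pvGoB (rules : List (List (String × String))) (inComment : Bool) (cbuf : List String)
    (depth : Int) (cur : List String) : List String → List (List (String × String))
  | [] =>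
    if inComment then rules ++ [pvEntry "comment" (PySem.Str.join "\n" cbuf)] else rules
  | line :: rest =>
    if inComment then
      let cbuf' := cbuf ++ [line]
      if PySem.Str.isIn "*/" line then
        pvGoB (rules ++ [pvEntry "comment" (PySem.Str.join "\n" cbuf')]) false [] depth cur rest
      else
        pvGoB rules true cbuf' depth cur rest
    else if PySem.Str.isIn "/*" line && !PySem.Str.isIn "*/" line then
      pvGoB rules true [line] depth cur rest
    else if PySem.Str.startswith (PySem.Str.strip line) "/*" &&
            PySem.Str.endswith (PySem.Str.strip line) "*/" then
      pvGoB (rules ++ [pvEntry "comment" line]) false cbuf depth cur rest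
    else
      let ob : Int := PySem.Str.count line "{"
      let cb : Int := PySem.Str.count line "}"
      if ob > 0 && depth == 0 then
        pvGoB rules false cbuf (depth + (ob - cb)) [line] rest
      else if depth > 0 then
        let cur' := cur ++ [line]
        let depth' := depth + (ob - cb)
        if depth' == 0 then
          pvGoB (rules ++ [pvEntry "rule" (PySem.Str.join "\n" cur')]) false cbuf depth' [] rest
        else
          pvGoB rules false cbuf depth' cur' rest
      else if PySem.Str.strip line ≠ "" then
        pvGoB (rules ++ [pvEntry "other" line]) false cbuf depth cur rest
      else
        pvGoB rules false cbuf depth cur rest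

def parse_css_rules_alt (css_content : String) : List (List (String × String)) :=
  pvGoB [] false [] 0 [] ((PySem.Str.split? css_content "\n").getD [])  -- sep "\n" ≠ "", so split? is always some

-- ===== PRECONDITION & SPEC =====
def Spec_parse_css_rules (css_content : String) (out : List (List (String × String))) : Prop := out = parse_css_rules_alt css_content
instance (css_content : String) (out : List (List (String × String))) : Decidable (Spec_parse_css_rules css_content out) := by unfold Spec_parse_css_rules; infer_instance

-- ===== CLAIM (what is proved, stated in full; the proofs are below) =====
def Claim_equal_parse_css_rules : Prop := ∀ (css_content : String), Dom_parse_css_rules css_content → Spec_parse_css_rules css_content (parse_css_rules css_content)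

-- ===== LEMMAS AND PROOFS =====

-- B in comment state behaves exactly like A's inner consuming loop
theorem pvGoB_comment (ls : List String) : ∀ (rules : List (List (String × String)))
    (cbuf : List String) (depth : Int) (cur : List String),
    pvGoB rules true cbuf depth cur ls =
      pvGoB (rules ++ [pvEntry "comment"
          (PySem.Str.join "\n" (cbuf ++ (pvConsumeA ls).1))]) false [] depth cur (pvConsumeA ls).2 := by
  induction ls with
  | nil =>
    intro rules cbuf depth cur
    simp only [pvGoB, pvConsumeA, if_true, Bool.false_eq_true, if_false, List.append_nil]
  | cons l ls ih =>
    intro rules cbuf depth cur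
    by_cases h : PySem.Str.isIn "*/" l = true
    · simp only [pvGoB, pvConsumeA, if_pos h, if_true]
    · simp only [pvGoB, pvConsumeA, if_neg h, if_true]
      rw [ih]
      simp only [List.append_assoc, List.singleton_append]

theorem pvGoA_eq_pvGoB (n : Nat) : ∀ (ls : List String), ls.length ≤ n →
    ∀ (rules : List (List (String × String))) (cur : List String) (depth : Int),
    pvGoA rules cur depth ls = pvGoB rules false [] depth cur ls := by
  induction n with
  | zero =>
    intro ls hls rules cur depth
    rw [List.length_eq_zero_iff.mp (Nat.le_zero.mp hls)]
    simp only [pvGoA, pvGoB, Bool.false_eq_true, if_false]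
  | succ n ih =>
    intro ls hls rules cur depth
    match ls with
    | [] => simp only [pvGoA, pvGoB, Bool.false_eq_true, if_false]
    | line :: rest =>
      simp only [List.length_cons, Nat.succ_le_succ_iff] at hls
      by_cases h1 : (PySem.Str.isIn "/*" line && !PySem.Str.isIn "*/" line) = true
      · simp only [pvGoA, pvGoB, Bool.false_eq_true, if_false, if_pos h1]
        rw [ih _ (le_trans (pvConsumeA_len rest) hls), pvGoB_comment]
        simp only [List.singleton_append]
      · simp only [pvGoA, pvGoB, Bool.false_eq_true, if_false, if_neg h1]
        by_cases h2 : (PySem.Str.startswith (PySem.Str.strip line) "/*" &&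
            PySem.Str.endswith (PySem.Str.strip line) "*/") = true
        · rw [if_pos h2, if_pos h2]; exact ih _ hls _ _ _
        · rw [if_neg h2, if_neg h2]
          by_cases h3 : ((PySem.Str.count line "{" : Int) > 0 && depth == 0) = true
          · rw [if_pos h3, if_pos h3]; exact ih _ hls _ _ _
          · rw [if_neg h3, if_neg h3]
            by_cases h4 : depth > 0
            · rw [if_pos h4, if_pos h4]
              by_cases h5 : (depth + ((PySem.Str.count line "{" : Int) -
                  (PySem.Str.count line "}" : Int)) == 0) = true
              · rw [if_pos h5, if_pos h5]; exact ih _ hls _ _ _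
              · rw [if_neg h5, if_neg h5]; exact ih _ hls _ _ _
            · rw [if_neg h4, if_neg h4]
              by_cases h6 : PySem.Str.strip line ≠ ""
              · rw [if_pos h6, if_pos h6]; exact ih _ hls _ _ _
              · rw [if_neg h6, if_neg h6]; exact ih _ hls _ _ _

-- ===== VERDICT (by name: the statement is the Claim_ definition above) =====
theorem parse_css_rules_spec : Claim_equal_parse_css_rules := by
  intro css_content _
  unfold Spec_parse_css_rules parse_css_rules parse_css_rules_alt
  exact pvGoA_eq_pvGoB _ _ le_rfl _ _ _
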